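-- pv_equiv track=rewrite | github.com/sidocoder/DSA | F_Array_Transformation.py | min_removals_to_beautiful
-- ===== SOURCE A (Python) =====
-- from collections import Counter
--
-- def min_removals_to_beautiful(n, arr):
--     hashh = Counter(arr)
--     freq_count = Counter(hashh.values())
--     total_elements = n
--     min_rem = n
--     removed = 0
--
--
--     for count, num_elements in sorted(freq_count.items()):
--
--         removals = removed + (total_elements - count * num_elements)
--         min_rem = min(min_rem, removals)
--
--
--         removed += num_elements * count
--         total_elements -= num_elements * count
--
--     return min_rem
-- ===== SOURCE B (Python) =====
-- from collections import Counter
--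
-- def min_removals_to_beautiful(n, arr):
--     freq_count = Counter(Counter(arr).values())
--     best = max((count * num_elements for count, num_elements in freq_count.items()), default=0)
--     return n - best
-- ===== Notes on version B (the rewrite author's own statement) =====
-- stated objective: simpler
-- what changed: Drops the sort and the removed/total_elements prefix accumulators: using the invariant removed + total_elements == n, B makes one unordered pass over Counter(Counter(arr).values()) taking the max of count*num_elements and returns n - best.
import Mathlib
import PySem

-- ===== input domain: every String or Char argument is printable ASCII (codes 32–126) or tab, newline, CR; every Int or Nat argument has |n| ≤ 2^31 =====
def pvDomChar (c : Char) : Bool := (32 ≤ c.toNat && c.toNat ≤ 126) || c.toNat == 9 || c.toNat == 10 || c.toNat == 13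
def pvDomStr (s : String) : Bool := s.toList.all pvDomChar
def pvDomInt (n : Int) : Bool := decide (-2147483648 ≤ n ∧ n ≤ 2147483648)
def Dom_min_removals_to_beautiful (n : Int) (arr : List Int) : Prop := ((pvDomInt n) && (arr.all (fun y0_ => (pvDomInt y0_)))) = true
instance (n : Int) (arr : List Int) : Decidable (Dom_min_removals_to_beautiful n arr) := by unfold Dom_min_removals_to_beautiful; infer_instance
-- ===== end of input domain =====

-- B replaces A's sort + prefix bookkeeping (removed/total_elements) by a single unordered
-- max pass using the invariant removed + total_elements == n; objective: simpler.


-- ===== PORT A =====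
-- literal port of A: two Counters, then a fold over sorted items with the state
-- (total_elements, min_rem, removed)
def min_removals_to_beautiful (n : Int) (arr : List Int) : Int :=
  let hashh := PySem.Dict.counter arr
  let freq_count := PySem.Dict.counter hashh.values
  let st := (PySem.List.sorted2 freq_count.items (fun p => p.1) (fun p => p.2)).foldl
    (fun (s : Int × Int × Int) p =>
      (s.1 - p.2 * p.1, min s.2.1 (s.2.2 + (s.1 - p.1 * p.2)), s.2.2 + p.2 * p.1))
    (n, n, 0)
  st.2.1

-- ===== PORT B =====
-- port of B: running max of count*num_elements over the unsorted items, then n - best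
def min_removals_to_beautiful_alt (n : Int) (arr : List Int) : Int :=
  let freq_count := PySem.Dict.counter (PySem.Dict.counter arr).values
  let best := freq_count.items.foldl (fun acc p => max acc (p.1 * p.2)) 0
  n - best

-- ===== PRECONDITION & SPEC =====
def Spec_min_removals_to_beautiful (n : Int) (arr : List Int) (out : Int) : Prop := out = min_removals_to_beautiful_alt n arr
instance (n : Int) (arr : List Int) (out : Int) : Decidable (Spec_min_removals_to_beautiful n arr out) := by unfold Spec_min_removals_to_beautiful; infer_instance

-- ===== CLAIM (what is proved, stated in full; the proofs are below) =====
def Claim_equal_min_removals_to_beautiful : Prop := ∀ (n : Int) (arr : List Int), Dom_min_removals_to_beautiful n arr → Spec_min_removals_to_beautiful n arr (min_removals_to_beautiful n arr)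

-- ===== LEMMAS AND PROOFS =====

-- A's loop invariant removed + total = n: its min_rem component is a plain running min of n - c*k
theorem loopA_min (n : Int) (l : List (Int × Int)) :
    ∀ (total minRem removed : Int), removed + total = n →
    (l.foldl (fun (s : Int × Int × Int) p =>
      (s.1 - p.2 * p.1, min s.2.1 (s.2.2 + (s.1 - p.1 * p.2)), s.2.2 + p.2 * p.1))
      (total, minRem, removed)).2.1
    = l.foldl (fun m p => min m (n - p.1 * p.2)) minRem := by
  induction l with
  | nil => intro _ _ _ _; rfl
  | cons p t ih =>
    intro total minRem removed hinv
    simp only [List.foldl_cons]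
    rw [ih _ _ _ (by omega)]
    have h : removed + (total - p.1 * p.2) = n - p.1 * p.2 := by omega
    rw [h]

-- running min of n - f p starting at n - a is n minus the running max of f p starting at a
theorem min_max_dual (n : Int) (l : List (Int × Int)) :
    ∀ (a : Int), l.foldl (fun m p => min m (n - p.1 * p.2)) (n - a)
      = n - l.foldl (fun acc p => max acc (p.1 * p.2)) a := by
  induction l with
  | nil => intro a; rfl
  | cons p t ih =>
    intro a
    simp only [List.foldl_cons]
    rw [show min (n - a) (n - p.1 * p.2) = n - max a (p.1 * p.2) by omega, ih]

-- the running min does not depend on the traversal order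
theorem foldl_min_perm (n : Int) {l₁ l₂ : List (Int × Int)} (h : l₁.Perm l₂) (m : Int) :
    l₁.foldl (fun m p => min m (n - p.1 * p.2)) m
      = l₂.foldl (fun m p => min m (n - p.1 * p.2)) m := by
  have : RightCommutative fun (m : Int) (p : Int × Int) => min m (n - p.1 * p.2) :=
    ⟨fun a b c => by simp only [min_assoc, min_comm (n - b.1 * b.2)]⟩
  exact h.foldl_eq m

-- ===== VERDICT (by name: the statement is the Claim_ definition above) =====
theorem min_removals_to_beautiful_spec : Claim_equal_min_removals_to_beautiful := by
  intro n arr _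
  show min_removals_to_beautiful n arr = min_removals_to_beautiful_alt n arr
  unfold min_removals_to_beautiful min_removals_to_beautiful_alt
  rw [loopA_min n _ n n 0 (by omega),
    foldl_min_perm n (PySem.List.sorted2_perm ..) n]
  simpa using min_max_dual n (PySem.Dict.counter (PySem.Dict.counter arr).values).items 0
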